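-- pv_equiv track=rewrite | github.com/VictoriqueCQ/LeetCode | nowcoder/华为机试/挑7.py | seven_das
-- ===== SOURCE A (Python) =====
-- def seven_das(number):
--     count_n = 0
--     for i in range(1,number+1):
--         if '7' in str(i):
--             count_n += 1
--         elif i % 7 ==0 :
--             count_n += 1
--     return count_n
-- ===== SOURCE B (Python) =====
-- def seven_das(number):
--     # Digit DP: count q < x with no digit 7, split by q % 7; answer by complement.
--     if number < 1:
--         return 0
--
--     def w(mp, m):
--         # over a full decade: r in 0..9 without digit 7 landing in mod class m
--         return sum(1 for r in range(10) if r != 7 and (3 * mp + r) % 7 == m)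
--
--     def has7(q):
--         while q > 0:
--             if q % 10 == 7:
--                 return True
--             q //= 10
--         return False
--
--     def V(x):
--         # V(x)[m] = #{q in [0, x) : q has no digit 7 and q % 7 == m}
--         if x == 0:
--             return [0] * 7
--         a, b = divmod(x, 10)
--         va = V(a)
--         return [sum(va[mp] * w(mp, m) for mp in range(7))
--                 + (0 if has7(a) else
--                    sum(1 for r in range(b) if r != 7 and (3 * (a % 7) + r) % 7 == m))
--                 for m in range(7)]
--
--     v = V(number + 1)
--     nosev = sum(v) - v[0]
--     return number - nosev
-- ===== Notes on version B (the rewrite author's own statement) =====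
-- stated objective: faster
-- what changed: A scans every i in 1..n testing '7' in str(i) and i % 7; B counts by a base-10 digit DP that tallies numbers without digit 7 per mod-7 residue class and returns the complement, never iterating over 1..n.
import Mathlib
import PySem

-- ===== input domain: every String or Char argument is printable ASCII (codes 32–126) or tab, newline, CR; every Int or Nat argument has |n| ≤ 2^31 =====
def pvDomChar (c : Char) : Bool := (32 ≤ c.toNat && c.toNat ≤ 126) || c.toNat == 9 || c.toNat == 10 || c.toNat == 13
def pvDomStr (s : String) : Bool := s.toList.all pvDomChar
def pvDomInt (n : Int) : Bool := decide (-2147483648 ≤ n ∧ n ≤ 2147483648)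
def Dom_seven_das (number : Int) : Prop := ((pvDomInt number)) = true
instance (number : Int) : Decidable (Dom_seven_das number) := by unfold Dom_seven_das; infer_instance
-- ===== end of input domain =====

-- B replaces A's scan over 1..n by a base-10 digit DP counting numbers without digit 7 per mod-7 class (alternative algorithm; checked faster on large inputs by the timing run).


-- ===== PORT A =====
def seven_das (number : Int) : Int :=
  (PySem.List.pyRange 1 (number + 1) 1).foldl
    (fun count_n i =>
      if PySem.Str.isIn "7" (PySem.Int.toStr i) then count_n + 1
      else if PySem.Int.mod i 7 == 0 then count_n + 1
      else count_n) 0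

-- ===== PORT B =====
-- helper w(mp, m) of Source B
def pvW (mp m : Int) : Int :=
  ((PySem.List.pyRange 0 10 1).countP
    (fun r => r != 7 && PySem.Int.mod (3 * mp + r) 7 == m) : Int)

-- helper has7(q) of Source B (the while-loop as recursion; its `q > 0` test is the q ≤ 0 stop here)
def pvHas7 (q : Int) : Bool :=
  if _h : q ≤ 0 then false
  else if PySem.Int.mod q 10 == 7 then true
  else pvHas7 (PySem.Int.floordiv q 10)
termination_by q.toNat
decreasing_by rw [PySem.Int.floordiv_eq_ediv_of_pos (by omega)]; omega

-- helper V(x) of Source B (only ever called on x ≥ 0; Python's `x == 0` base case is the x ≤ 0 guard, made total)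
def pvV (x : Int) : List Int :=
  if _hx : x ≤ 0 then List.replicate 7 0
  else
    let a := PySem.Int.floordiv x 10
    let b := PySem.Int.mod x 10
    let va := pvV a
    (PySem.List.pyRange 0 7 1).map (fun m =>
      ((PySem.List.pyRange 0 7 1).map (fun mp => PySem.List.pyGetD va mp 0 * pvW mp m)).sum
      + (if pvHas7 a then 0
         else ((PySem.List.pyRange 0 b 1).countP
                (fun r => r != 7 && PySem.Int.mod (3 * PySem.Int.mod a 7 + r) 7 == m) : Int)))
termination_by x.toNat
decreasing_by rw [PySem.Int.floordiv_eq_ediv_of_pos (by omega)]; omega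

def seven_das_alt (number : Int) : Int :=
  if number < 1 then 0
  else
    let v := pvV (number + 1)
    let nosev := v.sum - PySem.List.pyGetD v 0 0
    number - nosev

-- ===== PRECONDITION & SPEC =====
def Spec_seven_das (number : Int) (out : Int) : Prop := out = seven_das_alt number
instance (number : Int) (out : Int) : Decidable (Spec_seven_das number out) := by unfold Spec_seven_das; infer_instance

-- ===== CLAIM (what is proved, stated in full; the proofs are below) =====
def Claim_equal_seven_das : Prop := ∀ (number : Int), Dom_seven_das number → Spec_seven_das number (seven_das number)

-- ===== LEMMAS AND PROOFS =====

-- Nat-level mirror of Source B's has7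
def nHas7 (n : Nat) : Bool :=
  if n = 0 then false
  else if n % 10 = 7 then true
  else nHas7 (n / 10)
termination_by n
decreasing_by omega

-- Nat-level spec: numbers below x without digit 7, in mod-7 class m
def cntV (x m : Nat) : Nat := (List.range x).countP (fun q => !nHas7 q && q % 7 == m)
def wN (mp m : Nat) : Nat := (List.range 10).countP (fun r => r != 7 && (3 * mp + r) % 7 == m)
def partN (a b m : Nat) : Nat := (List.range b).countP (fun r => r != 7 && (3 * (a % 7) + r) % 7 == m)

theorem pvHas7_cast (n : Nat) : pvHas7 (n : Int) = nHas7 n := by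
  induction n using Nat.strong_induction_on with
  | _ n ih =>
    rw [pvHas7, nHas7]
    rcases Nat.eq_zero_or_pos n with h0 | hpos
    · subst h0; simp
    · rw [dif_neg (show ¬((n : Int) ≤ 0) by omega), if_neg (show ¬(n = 0) by omega)]
      have hm : PySem.Int.mod (n : Int) 10 = ((n % 10 : Nat) : Int) := by
        rw [PySem.Int.mod_eq_emod_of_pos (by norm_num)]; omega
      have hd : PySem.Int.floordiv (n : Int) 10 = ((n / 10 : Nat) : Int) := by
        rw [PySem.Int.floordiv_eq_ediv_of_pos (by norm_num)]; omega
      rw [hm, hd, ih (n / 10) (by omega)]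
      by_cases h7 : n % 10 = 7
      · simp [h7]
      · simp [h7]
        intro hc
        exact absurd hc (by omega)

theorem nHas7_decade (q r : Nat) (hr : r < 10) :
    nHas7 (10 * q + r) = (decide (r = 7) || nHas7 q) := by
  rw [nHas7]
  rcases Nat.eq_zero_or_pos (10 * q + r) with h0 | hpos
  · have hq : q = 0 := by omega
    have hrr : r = 0 := by omega
    subst hq; subst hrr
    rw [nHas7]; simp
  · rw [if_neg (by omega)]
    have h1 : (10 * q + r) % 10 = r := by omega
    have h2 : (10 * q + r) / 10 = q := by omega
    rw [h1, h2]
    by_cases h7 : r = 7 <;> simp [h7]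

theorem singleton_infix (a : Char) (l : List Char) : [a] <:+: l ↔ a ∈ l := by
  constructor
  · intro h; exact h.sublist.mem (List.mem_singleton_self a)
  · intro h
    obtain ⟨s, t, rfl⟩ := List.append_of_mem h
    exact ⟨s, t, by simp⟩

theorem digitChar_eq_seven (k : Nat) (hk : k < 10) : Nat.digitChar k = '7' ↔ k = 7 := by
  interval_cases k <;> simp [Nat.digitChar]

theorem mem_digitChar_cons (n : Nat) (acc : List Char) :
    '7' ∈ Nat.digitChar (n % 10) :: acc ↔ (n % 10 = 7 ∨ '7' ∈ acc) := by
  have hd : ('7' = Nat.digitChar (n % 10)) ↔ n % 10 = 7 := by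
    rw [eq_comm, digitChar_eq_seven (n % 10) (by omega)]
  simp [List.mem_cons, hd]

theorem toDigitsCore_seven (f : Nat) : ∀ (n : Nat) (acc : List Char), n < f →
    ('7' ∈ Nat.toDigitsCore 10 f n acc ↔ (nHas7 n = true ∨ '7' ∈ acc)) := by
  induction f with
  | zero => intro n acc h; omega
  | succ f ih =>
    intro n acc h
    rw [Nat.toDigitsCore]
    by_cases h0 : n / 10 = 0
    · simp only [h0, if_true]
      rw [mem_digitChar_cons, nHas7]
      rcases Nat.eq_zero_or_pos n with hn0 | hnp
      · subst hn0; simp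
      · rw [if_neg (by omega)]
        by_cases h7 : n % 10 = 7
        · simp [h7]
        · rw [nHas7, if_pos h0]
          simp [h7]
    · simp only [h0, if_false]
      rw [ih (n / 10) _ (by omega), mem_digitChar_cons]
      conv_rhs => rw [nHas7, if_neg (show ¬ n = 0 by omega)]
      by_cases h7 : n % 10 = 7
      · simp [h7]
      · simp [h7]

-- '7' in str(i)  =  arithmetic digit check
theorem isIn_toStr_eq (n : Nat) :
    PySem.Str.isIn "7" (PySem.Int.toStr (n : Int)) = nHas7 n := by
  have htl : (PySem.Int.toStr (n : Int)).toList = Nat.toDigits 10 n := by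
    rw [PySem.Int.toList_toStr]
    simp [PySem.Int.toChars]
  have hcore : '7' ∈ Nat.toDigits 10 n ↔ nHas7 n = true :=
    (toDigitsCore_seven (n + 1) n [] (by omega)).trans (by simp)
  rw [Bool.eq_iff_iff, PySem.Str.isIn_iff_infix, htl]
  have h7 : ("7" : String).toList = ['7'] := by decide
  rw [h7, singleton_infix, hcore]

theorem countP_block (q m c : Nat) (hc : c ≤ 10) :
    (List.range c).countP (fun r => !nHas7 (10 * q + r) && (10 * q + r) % 7 == m)
      = if nHas7 q then 0 else (List.range c).countP (fun r => r != 7 && (3 * (q % 7) + r) % 7 == m) := by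
  by_cases hq : nHas7 q
  · rw [if_pos hq]
    apply List.countP_eq_zero.mpr
    intro r hr
    have hr10 : r < 10 := by have := List.mem_range.mp hr; omega
    simp [nHas7_decade q r hr10, hq]
  · rw [if_neg hq]
    apply List.countP_congr
    intro r hr
    have hr10 : r < 10 := by have := List.mem_range.mp hr; omega
    have hmod : (10 * q + r) % 7 = (3 * (q % 7) + r) % 7 := by omega
    rw [nHas7_decade q r hr10, hmod]
    simp [hq]

theorem countP_range_mul (a m : Nat) :
    (List.range (10 * a)).countP (fun q => !nHas7 q && q % 7 == m)
      = ((List.range a).map (fun q => if nHas7 q then 0 else wN (q % 7) m)).sum := by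
  induction a with
  | zero => simp
  | succ a ih =>
    rw [show 10 * (a + 1) = 10 * a + 10 by ring, List.range_add, List.countP_append, ih]
    conv_rhs => rw [List.range_succ, List.map_append, List.sum_append]
    congr 1
    rw [List.countP_map]
    simpa [Function.comp, wN] using countP_block a m 10 (by omega)

theorem sum_map_add (l : List Nat) (f g : Nat → Nat) :
    (l.map (fun x => f x + g x)).sum = (l.map f).sum + (l.map g).sum := by
  induction l with
  | nil => simp
  | cons x xs ih => simp [ih]; omega

theorem oneHot (g : Nat → Nat) (c : Nat) (hc : c < 7) :
    ((List.range 7).map (fun mp => if c = mp then g mp else 0)).sum = g c := by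
  rw [show List.range 7 = [0,1,2,3,4,5,6] from by decide]
  interval_cases c <;> simp

theorem cntV_succ (a mp : Nat) :
    cntV (a + 1) mp = cntV a mp + (if (!nHas7 a && a % 7 == mp) = true then 1 else 0) := by
  rw [cntV, cntV, List.range_succ, List.countP_append]
  simp [List.countP_cons]

theorem regroup (a m : Nat) :
    ((List.range a).map (fun q => if nHas7 q then 0 else wN (q % 7) m)).sum
      = ((List.range 7).map (fun mp => cntV a mp * wN mp m)).sum := by
  induction a with
  | zero => simp [cntV]
  | succ a ih =>
    rw [List.range_succ, List.map_append, List.sum_append, ih]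
    have hstep : ∀ mp, cntV (a + 1) mp * wN mp m
        = cntV a mp * wN mp m + (if (!nHas7 a && a % 7 == mp) = true then wN mp m else 0) := by
      intro mp
      rw [cntV_succ]
      by_cases h : (!nHas7 a && a % 7 == mp) = true <;> simp [h] <;> ring
    simp only [hstep]
    rw [sum_map_add]
    congr 1
    by_cases h : nHas7 a
    · simp [h]
    · simp [h]
      exact (oneHot (fun mp => wN mp m) (a % 7) (by omega)).symm

theorem cntV_step (a b m : Nat) (hb : b < 10) :
    cntV (10 * a + b) m
      = ((List.range 7).map (fun mp => cntV a mp * wN mp m)).sum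
        + (if nHas7 a then 0 else partN a b m) := by
  rw [cntV, List.range_add, List.countP_append, countP_range_mul, regroup]
  congr 1
  rw [List.countP_map]
  simpa [Function.comp, partN] using countP_block a m b (by omega)

theorem countP_split {α : Type} (l : List α) (p r : α → Bool) :
    l.countP p = l.countP (fun a => p a && r a) + l.countP (fun a => p a && !r a) := by
  induction l with
  | nil => simp
  | cons x xs ih =>
    simp only [List.countP_cons, ih]
    cases hp : p x <;> cases hr : r x <;> simp [hp, hr] <;> omega

theorem classes_sum (x : Nat) :
    ((List.range 7).map (fun m => cntV x m)).sum = (List.range x).countP (fun q => !nHas7 q) := by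
  induction x with
  | zero => simp [cntV]
  | succ x ih =>
    simp only [cntV_succ]
    rw [sum_map_add, ih]
    conv_rhs => rw [List.range_succ, List.countP_append]
    congr 1
    by_cases h : nHas7 x
    · simp [h]
    · simp [h]
      exact oneHot (fun _ => 1) (x % 7) (by omega)

theorem pvW_cast (mp m : Nat) : pvW (mp : Int) (m : Int) = (wN mp m : Nat) := by
  rw [pvW, wN, PySem.List.pyRange_zero, show ((10:Int).toNat = 10) from rfl, List.countP_map]
  congr 1
  apply List.countP_congr
  intro r hr
  have hmod : PySem.Int.mod (3 * (mp : Int) + (r : Int)) 7 = ((3 * mp + r) % 7 : Nat) := by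
    rw [PySem.Int.mod_eq_emod_of_pos (by norm_num)]
    push_cast
    omega
  simp only [Function.comp, hmod]
  simp
  omega

theorem part_cast (a b m : Nat) :
    ((PySem.List.pyRange 0 (b : Int) 1).countP
        (fun r => r != 7 && PySem.Int.mod (3 * PySem.Int.mod (a : Int) 7 + r) 7 == (m : Int)) : Int)
      = (partN a b m : Nat) := by
  rw [partN, PySem.List.pyRange_zero_nat, List.countP_map]
  congr 1
  apply List.countP_congr
  intro r hr
  have ham : PySem.Int.mod (a : Int) 7 = ((a % 7 : Nat) : Int) := by
    rw [PySem.Int.mod_eq_emod_of_pos (by norm_num)]; omega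
  have hmod : PySem.Int.mod (3 * ((a % 7 : Nat) : Int) + (r : Int)) 7
      = ((3 * (a % 7) + r) % 7 : Nat) := by
    rw [PySem.Int.mod_eq_emod_of_pos (by norm_num)]
    push_cast
    omega
  simp only [Function.comp, ham, hmod]
  simp
  omega

theorem pvV_spec (x : Nat) :
    pvV (x : Int) = (PySem.List.pyRange 0 7 1).map (fun m => (cntV x m.toNat : Int)) := by
  induction x using Nat.strong_induction_on with
  | _ x ih =>
    rcases Nat.eq_zero_or_pos x with h0 | hpos
    · subst h0
      rw [pvV, dif_pos (by norm_num)]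
      rw [show PySem.List.pyRange 0 7 1 = [0,1,2,3,4,5,6] from by decide]
      simp [cntV]
    · rw [pvV, dif_neg (show ¬((x : Int) ≤ 0) by omega)]
      have ha : PySem.Int.floordiv (x : Int) 10 = ((x / 10 : Nat) : Int) := by
        rw [PySem.Int.floordiv_eq_ediv_of_pos (by norm_num)]; omega
      have hb : PySem.Int.mod (x : Int) 10 = ((x % 10 : Nat) : Int) := by
        rw [PySem.Int.mod_eq_emod_of_pos (by norm_num)]; omega
      simp only [ha, hb, ih (x / 10) (by omega), pvHas7_cast]
      apply List.map_congr_left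
      intro m hm
      obtain ⟨hm0, hm7⟩ := PySem.List.mem_pyRange_one.mp hm
      have hmcast : (m : Int) = ((m.toNat : Nat) : Int) := by omega
      have e1 : ∀ mp ∈ PySem.List.pyRange 0 7 1,
          PySem.List.pyGetD ((PySem.List.pyRange 0 7 1).map (fun m2 => (cntV (x / 10) m2.toNat : Int))) mp 0
              * pvW mp m
            = ((cntV (x / 10) mp.toNat * wN mp.toNat m.toNat : Nat) : Int) := by
        intro mp hmp
        obtain ⟨hp0, hp7⟩ := PySem.List.mem_pyRange_one.mp hmp
        rw [PySem.List.pyGetD_map_pyRange_of_nonneg _ 7 mp _ hp0 hp7]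
        rw [hmcast, show (mp : Int) = ((mp.toNat : Nat) : Int) from by omega, pvW_cast]
        simp only [Int.toNat_natCast]
        push_cast
        ring
      rw [List.map_congr_left e1]
      have e2 : (PySem.List.pyRange 0 7 1).map
            (fun mp => ((cntV (x / 10) mp.toNat * wN mp.toNat m.toNat : Nat) : Int))
          = (List.range 7).map (fun k => ((cntV (x / 10) k * wN k m.toNat : Nat) : Int)) := by
        rw [PySem.List.pyRange_zero, show ((7:Int).toNat = 7) from rfl, List.map_map]
        apply List.map_congr_left
        intro k hk
        simp
      rw [e2]
      have e3 : (if nHas7 (x / 10) then (0:Int)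
            else ((PySem.List.pyRange 0 ((x % 10 : Nat) : Int) 1).countP
                (fun r => r != 7 && PySem.Int.mod (3 * PySem.Int.mod ((x / 10 : Nat) : Int) 7 + r) 7 == m) : Int))
          = ((if nHas7 (x / 10) then 0 else partN (x / 10) (x % 10) m.toNat : Nat) : Int) := by
        by_cases h : nHas7 (x / 10)
        · simp [h]
        · rw [if_neg h, if_neg h, hmcast, part_cast]
          simp only [Int.toNat_natCast]
      rw [e3]
      rw [show (List.map (fun k => ((cntV (x / 10) k * wN k m.toNat : Nat) : Int)) (List.range 7))
            = List.map Nat.cast ((List.range 7).map (fun k => cntV (x / 10) k * wN k m.toNat)) from by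
          rw [List.map_map]; rfl]
      rw [← Nat.cast_list_sum, ← Nat.cast_add, ← cntV_step (x / 10) (x % 10) m.toNat (by omega),
          show 10 * (x / 10) + x % 10 = x from by omega]

-- A as a countP over 1..number
theorem seven_das_eq_countP (number : Int) (h1 : 1 ≤ number) :
    seven_das number
      = ((List.range number.toNat).countP (fun k => nHas7 (k + 1) || (k + 1) % 7 == 0) : Int) := by
  rw [seven_das]
  have hfun : (fun (count_n i : Int) =>
        if PySem.Str.isIn "7" (PySem.Int.toStr i) then count_n + 1
        else if PySem.Int.mod i 7 == 0 then count_n + 1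
        else count_n)
      = fun count_n i =>
        if (PySem.Str.isIn "7" (PySem.Int.toStr i) || (PySem.Int.mod i 7 == 0)) then count_n + 1
        else count_n := by
    funext c i
    simp only [Bool.or_eq_true]
    split_ifs <;> first | rfl | tauto
  rw [hfun, PySem.List.foldl_if_add_one
      (fun i => (PySem.Str.isIn "7" (PySem.Int.toStr i) || (PySem.Int.mod i 7 == 0))), zero_add]
  rw [PySem.List.pyRange_one, show (number + 1 - 1 : Int) = number from by ring, List.countP_map]
  congr 1
  apply List.countP_congr
  intro k _
  have hcast : (1 : Int) + (k : Int) = ((k + 1 : Nat) : Int) := by push_cast; ring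
  have hmod : PySem.Int.mod ((k + 1 : Nat) : Int) 7 = (((k + 1) % 7 : Nat) : Int) := by
    rw [PySem.Int.mod_eq_emod_of_pos (by norm_num)]; omega
  rw [Function.comp]
  simp only [hcast, isIn_toStr_eq, hmod]
  by_cases h7 : (k + 1) % 7 = 0 <;> simp [h7]
  · intro hc; exact absurd hc (by omega)

-- ===== VERDICT (by name: the statement is the Claim_ definition above) =====
theorem seven_das_spec : Claim_equal_seven_das := by
  unfold Claim_equal_seven_das Spec_seven_das
  intro number _hdom
  by_cases hn : number < 1
  · rw [seven_das, seven_das_alt, if_pos hn, PySem.List.pyRange_one_eq_nil (by omega)]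
    rfl
  · have h1 : 1 ≤ number := by omega
    set N := number.toNat with hN
    have hnum : number = (N : Int) := by omega
    have hv : pvV (number + 1) = (PySem.List.pyRange 0 7 1).map (fun m => (cntV (N + 1) m.toNat : Int)) := by
      rw [show number + 1 = ((N + 1 : Nat) : Int) from by omega]
      exact pvV_spec (N + 1)
    rw [seven_das_alt, if_neg hn]
    simp only [hv]
    have hsum : ((PySem.List.pyRange 0 7 1).map (fun m => (cntV (N + 1) m.toNat : Int))).sum
        = (((List.range (N + 1)).countP (fun q => !nHas7 q) : Nat) : Int) := by
      rw [PySem.List.pyRange_zero, show ((7:Int).toNat = 7) from rfl, List.map_map]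
      have hmm : List.map ((fun m => (cntV (N + 1) m.toNat : Int)) ∘ fun (k : Nat) => ((k : Int)))
            (List.range 7)
          = List.map Nat.cast ((List.range 7).map (fun k => cntV (N + 1) k)) := by
        rw [List.map_map]
        apply List.map_congr_left
        intro k _
        simp [Function.comp]
      rw [hmm, ← Nat.cast_list_sum, classes_sum]
    have hget : PySem.List.pyGetD ((PySem.List.pyRange 0 7 1).map (fun m => (cntV (N + 1) m.toNat : Int))) 0 0
        = ((cntV (N + 1) 0 : Nat) : Int) := by
      rw [PySem.List.pyGetD_map_pyRange_of_nonneg _ 7 0 _ (by norm_num) (by norm_num)]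
      rfl
    rw [hsum, hget, seven_das_eq_countP number h1]
    have fact1 : (List.range (N + 1)).countP (fun q => nHas7 q || q % 7 == 0)
        = 1 + (List.range N).countP (fun k => nHas7 (k + 1) || (k + 1) % 7 == 0) := by
      rw [List.range_succ_eq_map, List.countP_cons, List.countP_map]
      have h0 : nHas7 0 = false := by rw [nHas7]; rfl
      simp [h0, Function.comp, Nat.succ_eq_add_one, Nat.add_comm]
      apply List.countP_congr
      intro k _
      simp [Nat.succ_eq_add_one]
    have fact2 : (List.range (N + 1)).countP (fun q => nHas7 q || q % 7 == 0)
          + (List.range (N + 1)).countP (fun q => !nHas7 q && !(q % 7 == 0)) = N + 1 := by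
      have hsp := countP_split (List.range (N + 1)) (fun _ => true) (fun q => nHas7 q || q % 7 == 0)
      simp only [Bool.true_and, List.countP_true, List.length_range] at hsp
      have hcg : (List.range (N + 1)).countP (fun a => !(nHas7 a || a % 7 == 0))
          = (List.range (N + 1)).countP (fun q => !nHas7 q && !(q % 7 == 0)) := by
        apply List.countP_congr
        intro q _
        cases hq : nHas7 q <;> simp [hq]
      omega
    have fact3 : (List.range (N + 1)).countP (fun q => !nHas7 q)
        = cntV (N + 1) 0 + (List.range (N + 1)).countP (fun q => !nHas7 q && !(q % 7 == 0)) := by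
      have hs := countP_split (List.range (N + 1)) (fun q => !nHas7 q) (fun q => q % 7 == 0)
      rw [hs]
      rfl
    rw [hnum]
    simp only [Int.toNat_natCast]
    omega
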